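-- pv_equiv track=rewrite | github.com/BubuDavid/AdventOfCode2022 | day1/day1.py | part1
-- ===== SOURCE A (Python) =====
-- def part1(candies):
--     maxi, suma = 0, 0
--     for index, candy in enumerate(candies):
--         if candy == -1 or index == len(candies) - 1:
--             maxi = max(maxi, suma)
--             suma = 0
--         else:
--             suma += candy
--     return maxi
-- ===== SOURCE B (Python) =====
-- def part1(candies):
--     # Split everything except the (never-counted) last element into groups on -1,
--     # sum each group, and take the max with a 0 baseline.
--     groups, group = [], []
--     for c in candies[:-1]:
--         if c == -1:
--             groups.append(group)
--             group = []
--         else: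
--             group.append(c)
--     groups.append(group)
--     return max([0] + [sum(g) for g in groups])
-- ===== Notes on version B (the rewrite author's own statement) =====
-- stated objective: alternative
-- what changed: B separates the phases A interleaves: it slices off the last element (which A never adds to any group), explicitly splits the rest into groups on the -1 separator, maps sum over the groups, and takes max with a 0 baseline, instead of A's single loop carrying a running sum and running max keyed on an index==len-1 test.
import Mathlib
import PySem

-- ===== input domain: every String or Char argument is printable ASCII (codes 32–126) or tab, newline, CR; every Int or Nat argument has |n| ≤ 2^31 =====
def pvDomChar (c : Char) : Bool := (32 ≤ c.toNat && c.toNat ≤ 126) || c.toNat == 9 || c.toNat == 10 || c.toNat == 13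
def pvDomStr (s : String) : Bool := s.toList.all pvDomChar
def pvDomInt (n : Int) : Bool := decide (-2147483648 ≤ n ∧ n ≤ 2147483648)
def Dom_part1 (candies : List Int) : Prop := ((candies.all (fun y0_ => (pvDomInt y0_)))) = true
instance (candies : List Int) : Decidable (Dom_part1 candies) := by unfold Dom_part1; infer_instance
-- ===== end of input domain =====

-- B restructures A: A's single loop carries a running sum and running max with an
-- index == len-1 test; B slices off the last element, splits the rest into groups
-- on -1, sums each group, and takes max([0] + sums). Same values, total.

-- ===== PORT A =====
def part1 (candies : List Int) : Int :=
  ((PySem.List.enumerate candies 0).foldl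
    (fun (s : Int × Int) p =>
      if p.2 = -1 ∨ p.1 = (candies.length : Int) - 1 then (max s.1 s.2, 0)
      else (s.1, s.2 + p.2)) ((0 : Int), (0 : Int))).1

-- ===== PORT B =====
def part1_alt (candies : List Int) : Int :=
  let st := (PySem.List.slice candies none (some (-1))).foldl
    (fun (s : List (List Int) × List Int) c =>
      if c = -1 then (s.1 ++ [s.2], ([] : List Int)) else (s.1, s.2 ++ [c]))
    (([] : List (List Int)), ([] : List Int))
  let groups := st.1 ++ [st.2]
  let sums := groups.map (fun g => g.foldl (· + ·) (0 : Int))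
  (PySem.List.max? ((0 : Int) :: sums) (fun y => y)).getD 0

-- ===== PRECONDITION & SPEC =====
def Spec_part1 (candies : List Int) (out : Int) : Prop := out = part1_alt candies
instance (candies : List Int) (out : Int) : Decidable (Spec_part1 candies out) := by unfold Spec_part1; infer_instance

-- ===== CLAIM (what is proved, stated in full; the proofs are below) =====
def Claim_equal_part1 : Prop := ∀ (candies : List Int), Dom_part1 candies → Spec_part1 candies (part1 candies)

-- ===== LEMMAS AND PROOFS =====

-- A's loop body on the non-last elements (index test never fires there).
def pvStepA (s : Int × Int) (c : Int) : Int × Int :=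
  if c = -1 then (max s.1 s.2, 0) else (s.1, s.2 + c)

-- B's loop body.
def pvStepB (s : List (List Int) × List Int) (c : Int) : List (List Int) × List Int :=
  if c = -1 then (s.1 ++ [s.2], []) else (s.1, s.2 ++ [c])

def pvSum (g : List Int) : Int := g.foldl (· + ·) 0

lemma pvSum_concat (g : List Int) (c : Int) : pvSum (g ++ [c]) = pvSum g + c := by
  simp [pvSum, List.foldl_append]

-- Core invariant: A's (max, sum) state tracks B's (groups, current group) state.
lemma core (xs : List Int) :
    ∀ (gs : List (List Int)) (g : List Int) (m s : Int),
      m = List.foldl max 0 (gs.map pvSum) → s = pvSum g →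
      (let a := xs.foldl pvStepA (m, s)
       max a.1 a.2) =
      (let b := xs.foldl pvStepB (gs, g)
       List.foldl max 0 ((b.1 ++ [b.2]).map pvSum)) := by
  induction xs with
  | nil =>
    intro gs g m s hm hs
    simp [hm, hs]
  | cons c xs ih =>
    intro gs g m s hm hs
    by_cases hc : c = -1
    · simpa [List.foldl_cons, pvStepA, pvStepB, hc] using
        ih (gs ++ [g]) [] (max m s) 0
          (by simp [hm, hs]) (by simp [pvSum])
    · simpa [List.foldl_cons, pvStepA, pvStepB, hc] using
        ih gs (g ++ [c]) m (s + c) hm (by simp [pvSum_concat, hs])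

-- A equals the stepA fold over dropLast, finished by a final flush.
lemma part1_eq_dropLast (candies : List Int) :
    part1 candies =
      (let a := candies.dropLast.foldl pvStepA (0, 0)
       max a.1 a.2) := by
  rcases List.eq_nil_or_concat candies with h | ⟨ys, z, rfl⟩
  · subst h; simp [part1, PySem.List.enumerate]
  · have hlen : ((ys ++ [z]).length : Int) - 1 = (ys.length : Int) := by
      simp
    unfold part1
    simp only [List.concat_eq_append]
    rw [PySem.List.enumerate_append]
    simp only [List.foldl_append]
    have hcongr :
        (PySem.List.enumerate ys 0).foldl
          (fun (s : Int × Int) p =>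
            if p.2 = -1 ∨ p.1 = ((ys ++ [z]).length : Int) - 1 then (max s.1 s.2, 0)
            else (s.1, s.2 + p.2)) (0, 0)
        = (PySem.List.enumerate ys 0).foldl (fun s p => pvStepA s p.2) (0, 0) := by
      apply PySem.List.foldl_congr_mem
      intro acc p hp
      rcases (PySem.List.mem_enumerate_iff _ _ _).mp hp with ⟨k, hk, rfl⟩
      have hne : ((0 : Int) + k) ≠ ((ys ++ [z]).length : Int) - 1 := by
        rw [hlen]; omega
      simp only [pvStepA, hne, or_false]
    rw [hcongr]
    have hmap : (PySem.List.enumerate ys 0).foldl (fun s p => pvStepA s p.2) (0, 0)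
        = ys.foldl pvStepA (0, 0) := by
      conv_rhs => rw [← PySem.List.map_snd_enumerate (xs := ys) (s := 0)]
      rw [List.foldl_map]
    rw [hmap]
    simp [PySem.List.enumerate]

-- ===== VERDICT (by name: the statement is the Claim_ definition above) =====
theorem part1_spec : Claim_equal_part1 := by
  intro candies _
  unfold Spec_part1 part1_alt
  rw [PySem.List.slice_to_neg_one]
  simp only [PySem.List.max?_id_cons, Option.getD_some]
  rw [part1_eq_dropLast]
  have := core candies.dropLast [] [] 0 0 (by simp) (by simp [pvSum])
  simp only at this
  exact this
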